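-- pv_equiv track=rewrite | github.com/jrantunes/URIs-Python-3 | URIs/URI3053.py | troca
-- ===== SOURCE A (Python) =====
-- def troca(lista1, lista2):
--     for l in lista1:
--         if l == 1:
--             lista2[0], lista2[1], lista2[2] = lista2[1], lista2[0], lista2[2]
--         elif l == 2:
--             lista2[0], lista2[1], lista2[2] = lista2[0], lista2[2], lista2[1]
--         elif l == 3:
--             lista2[0], lista2[1], lista2[2] = lista2[2], lista2[1], lista2[0]
--     return lista2
-- ===== SOURCE B (Python) =====
-- _SWAPS = {1: (0, 1), 2: (1, 2), 3: (0, 2)}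
--
-- def troca(lista1, lista2):
--     # Compose all swap codes into one net index permutation, then apply it once (in place).
--     pairs = [_SWAPS[l] for l in lista1 if l in _SWAPS]
--     perm = [0, 1, 2]
--     for i, j in pairs:
--         perm[i], perm[j] = perm[j], perm[i]
--     if pairs:
--         lista2[0], lista2[1], lista2[2] = lista2[perm[0]], lista2[perm[1]], lista2[perm[2]]
--     return lista2
-- ===== Notes on version B (the rewrite author's own statement) =====
-- stated objective: alternative
-- what changed: Instead of rewriting the three list cells on every swap code, B maps the codes through a code-to-index-pair table, composes them into a single net permutation of [0,1,2], and applies that permutation to lista2 once at the end.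
import Mathlib
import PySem

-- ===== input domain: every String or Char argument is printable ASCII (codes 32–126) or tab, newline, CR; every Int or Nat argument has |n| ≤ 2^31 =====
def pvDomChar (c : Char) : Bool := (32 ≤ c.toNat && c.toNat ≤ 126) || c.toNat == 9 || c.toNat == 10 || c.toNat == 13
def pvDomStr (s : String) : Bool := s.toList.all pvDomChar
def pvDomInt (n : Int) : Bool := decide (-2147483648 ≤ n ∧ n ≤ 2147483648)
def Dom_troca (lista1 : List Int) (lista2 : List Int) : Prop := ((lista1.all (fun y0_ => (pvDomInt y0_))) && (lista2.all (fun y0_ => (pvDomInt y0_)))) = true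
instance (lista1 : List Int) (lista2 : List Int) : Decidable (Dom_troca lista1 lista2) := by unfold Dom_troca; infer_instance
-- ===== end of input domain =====

-- B composes all swap codes into one net index permutation (via a code→index-pair table)
-- and applies it once; return-value equivalence proved (both Pythons mutate lista2 in
-- place identically inside Pre_).

-- ===== PORT A =====
-- one iteration of A's for-loop; indices 0,1,2 are in range inside Pre_, so getD is exact there
def trocaStep (xs : List Int) (l : Int) : List Int :=
  if l = 1 then xs.getD 1 0 :: xs.getD 0 0 :: xs.getD 2 0 :: xs.drop 3
  else if l = 2 then xs.getD 0 0 :: xs.getD 2 0 :: xs.getD 1 0 :: xs.drop 3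
  else if l = 3 then xs.getD 2 0 :: xs.getD 1 0 :: xs.getD 0 0 :: xs.drop 3
  else xs

def troca (lista1 : List Int) (lista2 : List Int) : List Int :=
  lista1.foldl trocaStep lista2

-- ===== PORT B =====
-- the literal dict _SWAPS of Source B
def pvSwaps : PySem.Dict Int (Nat × Nat) :=
  PySem.Dict.ofList [(1, (0, 1)), (2, (1, 2)), (3, (0, 2))]

-- one iteration of B's for-loop: perm[i], perm[j] = perm[j], perm[i]
def permSwap (perm : List Nat) (p : Nat × Nat) : List Nat :=
  (perm.set p.1 (perm.getD p.2 0)).set p.2 (perm.getD p.1 0)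

def troca_alt (lista1 : List Int) (lista2 : List Int) : List Int :=
  let pairs := lista1.filterMap (fun l => pvSwaps.get? l)
  let perm := pairs.foldl permSwap [0, 1, 2]
  if pairs ≠ [] then
    lista2.getD (perm.getD 0 0) 0 :: lista2.getD (perm.getD 1 0) 0 ::
      lista2.getD (perm.getD 2 0) 0 :: lista2.drop 3
  else lista2

-- ===== PRECONDITION & SPEC =====
-- Pre_ excludes exactly the inputs where A raises IndexError: lista2 shorter than 3 while
-- lista1 contains some swap code 1/2/3 (B raises there too).
def Pre_troca (lista1 : List Int) (lista2 : List Int) : Prop :=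
  (∀ l ∈ lista1, l ≠ 1 ∧ l ≠ 2 ∧ l ≠ 3) ∨ 3 ≤ lista2.length
instance (lista1 : List Int) (lista2 : List Int) : Decidable (Pre_troca lista1 lista2) := by
  unfold Pre_troca; infer_instance
def pvWitness_troca : List Int × List Int := ([1, 3, 2, 7], [10, 20, 30, 40])

def Spec_troca (lista1 : List Int) (lista2 : List Int) (out : List Int) : Prop := out = troca_alt lista1 lista2
instance (lista1 : List Int) (lista2 : List Int) (out : List Int) : Decidable (Spec_troca lista1 lista2 out) := by unfold Spec_troca; infer_instance

-- ===== CLAIM (what is proved, stated in full; the proofs are below) =====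
def Claim_equal_troca : Prop := ∀ (lista1 : List Int) (lista2 : List Int), Dom_troca lista1 lista2 → Pre_troca lista1 lista2 → Spec_troca lista1 lista2 (troca lista1 lista2)

-- ===== LEMMAS AND PROOFS =====

-- applying a net index permutation [p0,p1,p2] to the first three cells of ys
def applyL (perm : List Nat) (ys : List Int) : List Int :=
  ys.getD (perm.getD 0 0) 0 :: ys.getD (perm.getD 1 0) 0 :: ys.getD (perm.getD 2 0) 0 :: ys.drop 3

theorem swaps_get? (l : Int) :
    pvSwaps.get? l =
      if l = 1 then some (0, 1) else if l = 2 then some (1, 2)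
      else if l = 3 then some (0, 2) else none := by
  have hm : pvSwaps = PySem.Dict.mk [(1, (0, 1)), (2, (1, 2)), (3, (0, 2))] := by decide
  rw [hm]
  simp only [PySem.Dict.get?_mk_cons]
  split_ifs with h1 h2 h3 <;> simp_all [PySem.Dict.get?]

theorem foldl_main (l1 : List Int) (p0 p1 p2 : Nat) (ys : List Int) :
    l1.foldl trocaStep (applyL [p0, p1, p2] ys)
      = applyL ((l1.filterMap (fun l => pvSwaps.get? l)).foldl permSwap [p0, p1, p2]) ys := by
  induction l1 generalizing p0 p1 p2 with
  | nil => rfl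
  | cons a t ih =>
      by_cases h1 : a = 1
      · have hg : pvSwaps.get? a = some (0, 1) := by rw [swaps_get?, if_pos h1]
        have hs : trocaStep (applyL [p0, p1, p2] ys) a = applyL [p1, p0, p2] ys := by
          simp [trocaStep, applyL, h1]
        have hp : permSwap [p0, p1, p2] (0, 1) = [p1, p0, p2] := by simp [permSwap]
        simp only [List.foldl_cons, List.filterMap_cons, hg, hs, hp]
        exact ih p1 p0 p2
      by_cases h2 : a = 2
      · have hg : pvSwaps.get? a = some (1, 2) := by
          rw [swaps_get?, if_neg h1, if_pos h2]
        have hs : trocaStep (applyL [p0, p1, p2] ys) a = applyL [p0, p2, p1] ys := by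
          simp [trocaStep, applyL, h2]
        have hp : permSwap [p0, p1, p2] (1, 2) = [p0, p2, p1] := by simp [permSwap]
        simp only [List.foldl_cons, List.filterMap_cons, hg, hs, hp]
        exact ih p0 p2 p1
      by_cases h3 : a = 3
      · have hg : pvSwaps.get? a = some (0, 2) := by
          rw [swaps_get?, if_neg h1, if_neg h2, if_pos h3]
        have hs : trocaStep (applyL [p0, p1, p2] ys) a = applyL [p2, p1, p0] ys := by
          simp [trocaStep, applyL, h3]
        have hp : permSwap [p0, p1, p2] (0, 2) = [p2, p1, p0] := by simp [permSwap]
        simp only [List.foldl_cons, List.filterMap_cons, hg, hs, hp]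
        exact ih p2 p1 p0
      · have hg : pvSwaps.get? a = none := by
          rw [swaps_get?, if_neg h1, if_neg h2, if_neg h3]
        have hs : trocaStep (applyL [p0, p1, p2] ys) a = applyL [p0, p1, p2] ys := by
          simp [trocaStep, h1, h2, h3]
        simp only [List.foldl_cons, List.filterMap_cons, hg, hs]
        exact ih p0 p1 p2

theorem applyL_id (ys : List Int) (h : 3 ≤ ys.length) : applyL [0, 1, 2] ys = ys := by
  match ys, h with
  | a :: b :: c :: t, _ => simp [applyL]

theorem allInvalid_trocaStep (l1 : List Int) (xs : List Int)
    (h : ∀ l ∈ l1, l ≠ 1 ∧ l ≠ 2 ∧ l ≠ 3) : l1.foldl trocaStep xs = xs := by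
  induction l1 generalizing xs with
  | nil => rfl
  | cons a t ih =>
      have ha := h a (by simp)
      simp only [List.foldl_cons, trocaStep, if_neg ha.1, if_neg ha.2.1, if_neg ha.2.2]
      exact ih xs (fun l hl => h l (by simp [hl]))

theorem pairs_nil_invalid (l1 : List Int)
    (h : l1.filterMap (fun l => pvSwaps.get? l) = []) : ∀ l ∈ l1, l ≠ 1 ∧ l ≠ 2 ∧ l ≠ 3 := by
  intro l hl
  have hn := (List.filterMap_eq_nil_iff.mp h) l hl
  rw [swaps_get? l] at hn
  split_ifs at hn with h1 h2 h3
  exact ⟨h1, h2, h3⟩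

-- ===== VERDICT (by name: the statement is the Claim_ definition above) =====
theorem troca_spec : Claim_equal_troca := by
  intro l1 l2 _ hpre
  unfold Spec_troca troca troca_alt
  by_cases hnil : l1.filterMap (fun l => pvSwaps.get? l) = []
  · simp only [hnil, ne_eq, not_true_eq_false, if_false]
    exact allInvalid_trocaStep l1 l2 (pairs_nil_invalid l1 hnil)
  · have h3 : 3 ≤ l2.length := by
      rcases hpre with h | h
      · exact absurd (List.filterMap_eq_nil_iff.mpr (fun l hl => by
          rw [swaps_get? l]
          simp [(h l hl).1, (h l hl).2.1, (h l hl).2.2])) hnil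
      · exact h
    have key := foldl_main l1 0 1 2 l2
    rw [applyL_id l2 h3] at key
    simp only [hnil, ne_eq, not_false_eq_true, if_true, key, applyL]
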